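-- pv_equiv track=rewrite | github.com/wplohrmann/projects | code_jam2022/qualification_round/c.py | solve
-- ===== SOURCE A (Python) =====
-- def solve(dice):
--     max_possible = min(len(dice), max(dice))
--     dice = sorted(dice)[-max_possible:]
--     while True:
--         for i in range(max_possible):
--             if dice[i] < i+1:
--                 max_possible -= 1
--                 dice = dice[1:]
--                 break
--         else:
--             return max_possible
-- ===== SOURCE B (Python) =====
-- def solve(dice):
--     # Sort once, then a single greedy pass: a die with value >= count+1 can be
--     # placed at position count+1 of the straight.  O(n log n) vs A's O(n^2).
--     count = 0
--     for d in sorted(dice):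
--         if d >= count + 1:
--             count += 1
--     return count
-- ===== Notes on version B (the rewrite author's own statement) =====
-- stated objective: faster
-- what changed: Replaces A's repeated rescan-and-drop loop over the top slice (worst-case quadratic) by a single greedy left-to-right pass over the sorted list that increments the count whenever a die value reaches count+1.
-- intended difference: On nonempty lists whose values are all negative, A returns min(len(dice), max(dice)) = max(dice), a negative 'chain length' (an artefact of slicing with a negative bound and range() over a negative count); B returns 0, the intended length of the longest buildable straight. — e.g. on solve([-2]): A returns -2, B returns 0
import Mathlib
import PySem

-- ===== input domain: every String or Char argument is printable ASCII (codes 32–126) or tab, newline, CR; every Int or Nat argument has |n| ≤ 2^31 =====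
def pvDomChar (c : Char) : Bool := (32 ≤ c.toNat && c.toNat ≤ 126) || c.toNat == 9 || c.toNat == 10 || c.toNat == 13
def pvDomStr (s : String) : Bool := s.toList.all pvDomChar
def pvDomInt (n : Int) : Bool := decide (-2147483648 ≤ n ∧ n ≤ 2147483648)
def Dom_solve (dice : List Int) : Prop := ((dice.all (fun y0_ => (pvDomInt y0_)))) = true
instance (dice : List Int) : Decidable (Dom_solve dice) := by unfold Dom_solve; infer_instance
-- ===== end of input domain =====

-- A builds the top slice of the sorted dice and repeatedly rescans it, dropping the
-- smallest die until every position i holds a die >= i+1 (worst-case quadratic);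
-- B makes one greedy pass over the sorted list (count += 1 whenever d >= count+1).
-- On nonempty all-negative input A returns max(dice) (negative); B returns the intended 0 (see D_solve).


-- ===== PORT A =====
-- A's 'while True' loop: max_possible strictly decreases on every 'break' iteration, so it is
-- the structural recursion fuel.  The inner 'for i in range(max_possible)' only decides whether
-- SOME i has dice[i] < i+1 (its body does not use i), so the break test is an '.any' over the range.
-- dice[i] is ported with pyGet?; the '.getD 0' default is unreachable (the slice kept by the loop
-- always has length max_possible, so every index of range(max_possible) is in range).
def solveLoop : Nat → List Int → Int
  | 0, _ => 0
  | (mp+1), t =>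
      if (List.range (mp+1)).any (fun i => decide ((PySem.List.pyGet? t (i : Int)).getD 0 < (i : Int) + 1))
      then solveLoop mp (PySem.List.slice t (some 1) none)
      else ((mp : Int) + 1)

def solve (dice : List Int) : Int :=
  let m := (PySem.List.max? dice (fun x => x)).getD 0   -- Pre_solve excludes [], where max() raises
  let mp := min (dice.length : Int) m
  let t := PySem.List.slice (PySem.List.sorted dice (fun x => x) false) (some (-mp)) none
  if mp < 0 then mp          -- range(mp) is empty for mp < 0: the while loop returns mp at once
  else solveLoop mp.toNat t

-- ===== PORT B =====
def solve_alt (dice : List Int) : Int :=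
  (PySem.List.sorted dice (fun x => x) false).foldl
    (fun count d => if count + 1 ≤ d then count + 1 else count) 0

-- ===== PRECONDITION & SPEC =====
-- Pre_ excludes only the empty list, on which A's 'max(dice)' raises ValueError.
def Pre_solve (dice : List Int) : Prop := dice ≠ []
instance (dice : List Int) : Decidable (Pre_solve dice) := by unfold Pre_solve; infer_instance
def pvWitness_solve : List Int := [2, 1, 2]

-- On nonempty lists whose values are all negative, A returns max(dice), a negative "chain
-- length" (artefact of the negative slice bound and range() over a negative count); B returns 0,
-- the intended length of the longest buildable straight.
def D_solve (dice : List Int) : Prop := dice ≠ [] ∧ ∀ d ∈ dice, d < 0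
instance (dice : List Int) : Decidable (D_solve dice) := by unfold D_solve; infer_instance

def Spec_solve (dice : List Int) (out : Int) : Prop := ¬ D_solve dice → out = solve_alt dice
instance (dice : List Int) (out : Int) : Decidable (Spec_solve dice out) := by unfold Spec_solve; infer_instance

def pvDiffWitness_solve : List Int := [-2]
def pvDiffWitnessOut_solve : Int × Int := (-2, 0)

-- ===== CLAIM (what is proved, stated in full; the proofs are below) =====
def Claim_unchanged_solve : Prop := ∀ (dice : List Int), Dom_solve dice → Pre_solve dice → Spec_solve dice (solve dice)
def Claim_changed_solve : Prop := Dom_solve (pvDiffWitness_solve) ∧ Pre_solve (pvDiffWitness_solve) ∧ D_solve (pvDiffWitness_solve) ∧ solve (pvDiffWitness_solve) = pvDiffWitnessOut_solve.1 ∧ solve_alt (pvDiffWitness_solve) = pvDiffWitnessOut_solve.2 ∧ pvDiffWitnessOut_solve.1 ≠ pvDiffWitnessOut_solve.2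
def Claim_exact_solve : Prop := ∀ (dice : List Int), Dom_solve dice → Pre_solve dice → D_solve dice → solve dice ≠ solve_alt dice

-- ===== LEMMAS AND PROOFS =====

-- B's greedy count with a Nat accumulator (the Int accumulator of the port stays ≥ 0).
def gN (s : List Int) (c : Nat) : Nat :=
  s.foldl (fun c d => if (c : Int) + 1 ≤ d then c + 1 else c) c

theorem gN_cons (d : Int) (rest : List Int) (c : Nat) :
    gN (d :: rest) c = if (c : Int) + 1 ≤ d then gN rest (c + 1) else gN rest c := by
  by_cases h : (c : Int) + 1 ≤ d
  · rw [if_pos h]; simp only [gN, List.foldl_cons, if_pos h]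
  · rw [if_neg h]; simp only [gN, List.foldl_cons, if_neg h]

theorem gN_cast (s : List Int) (c : Nat) :
    s.foldl (fun count d => if count + 1 ≤ d then count + 1 else count) (c : Int) = (gN s c : Int) := by
  induction s generalizing c with
  | nil => rfl
  | cons d rest ih =>
      rw [List.foldl_cons, gN_cons]
      by_cases h : (c : Int) + 1 ≤ d
      · rw [if_pos h, if_pos h]
        have := ih (c + 1)
        push_cast at this ⊢
        rw [← this]
      · rw [if_neg h, if_neg h]
        exact ih c

theorem gN_ge (s : List Int) (c : Nat) : c ≤ gN s c := by
  induction s generalizing c with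
  | nil => exact le_rfl
  | cons d rest ih =>
      rw [gN_cons]
      by_cases h : (c : Int) + 1 ≤ d
      · rw [if_pos h]; exact le_trans (Nat.le_succ c) (ih (c + 1))
      · rw [if_neg h]; exact ih c

theorem gN_le (s : List Int) (c : Nat) : gN s c ≤ c + s.length := by
  induction s generalizing c with
  | nil => simp [gN]
  | cons d rest ih =>
      rw [gN_cons, List.length_cons]
      by_cases h : (c : Int) + 1 ≤ d
      · rw [if_pos h]; have := ih (c + 1); omega
      · rw [if_neg h]; have := ih c; omega

theorem gN_mono (s : List Int) {c c' : Nat} (h : c ≤ c') : gN s c ≤ gN s c' := by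
  induction s generalizing c c' with
  | nil => exact h
  | cons d rest ih =>
      rw [gN_cons, gN_cons]
      by_cases h1 : (c : Int) + 1 ≤ d <;> by_cases h2 : (c' : Int) + 1 ≤ d
      · rw [if_pos h1, if_pos h2]; exact ih (by omega)
      · rw [if_pos h1, if_neg h2]; exact ih (by omega)
      · rw [if_neg h1, if_pos h2]; exact ih (by omega)
      · rw [if_neg h1, if_neg h2]; exact ih h

-- "the suffix works from count c": position i of t holds a die ≥ c+i+1
def Ok (c : Nat) (t : List Int) : Prop := ∀ (i : Nat) (v : Int), t[i]? = some v → (c : Int) + (i : Int) + 1 ≤ v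

-- greedy soundness: the top (gN s c - c) dice of the sorted s work from count c
theorem gN_ok (s : List Int) (hp : s.Pairwise (· ≤ ·)) (c : Nat) :
    Ok c (s.drop (s.length - (gN s c - c))) := by
  induction s generalizing c with
  | nil => unfold Ok; intro i v hv; simp at hv
  | cons d rest ih =>
      have hpr : rest.Pairwise (· ≤ ·) := (List.pairwise_cons.mp hp).2
      have hd : ∀ y ∈ rest, d ≤ y := (List.pairwise_cons.mp hp).1
      by_cases h1 : (c : Int) + 1 ≤ d
      · rw [gN_cons, if_pos h1]
        have hge := gN_ge rest (c + 1)
        have hle := gN_le rest (c + 1)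
        have ihh := ih hpr (c + 1)
        set g := gN rest (c + 1) with hgdef
        by_cases hk : g - c = rest.length + 1
        · -- the whole list d :: rest works
          have h0 : (d :: rest).length - (g - c) = 0 := by simp only [List.length_cons]; omega
          rw [h0, List.drop_zero]
          unfold Ok
          have ihh' : Ok (c + 1) rest := by
            rw [show rest.length - (g - (c + 1)) = 0 by omega, List.drop_zero] at ihh
            exact ihh
          intro i v hv
          cases i with
          | zero =>
              simp only [List.getElem?_cons_zero, Option.some.injEq] at hv
              subst hv; push_cast; omega
          | succ j =>
              rw [List.getElem?_cons_succ] at hv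
              have := ihh' j v hv
              push_cast at this ⊢; omega
        · have hkle : g - c ≤ rest.length := by omega
          have hdrop : (d :: rest).length - (g - c) = (rest.length - (g - c)) + 1 := by
            simp only [List.length_cons]; omega
          rw [hdrop, List.drop_succ_cons]
          unfold Ok
          rw [show rest.length - (g - (c + 1)) = rest.length - (g - c) + 1 by omega] at ihh
          intro i v hv
          rw [List.getElem?_drop] at hv
          cases i with
          | zero =>
              have hmem : v ∈ rest := List.mem_of_getElem? hv
              have := hd v hmem
              push_cast; omega
          | succ j =>
              have hv' : (rest.drop (rest.length - (g - c) + 1))[j]? = some v := by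
                rw [List.getElem?_drop, show rest.length - (g - c) + 1 + j
                    = rest.length - (g - c) + (j + 1) by omega]
                exact hv
              have := ihh j v hv'
              push_cast at this ⊢; omega
      · rw [gN_cons, if_neg h1]
        have hle := gN_le rest c
        have hge := gN_ge rest c
        have hdrop : (d :: rest).length - (gN rest c - c)
            = (rest.length - (gN rest c - c)) + 1 := by
          simp only [List.length_cons]; omega
        rw [hdrop, List.drop_succ_cons]
        exact ih hpr c

-- greedy completeness: if the top-k suffix works from count c, greedy reaches at least c + k
theorem gN_complete (s : List Int) (hp : s.Pairwise (· ≤ ·)) :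
    ∀ c k, k ≤ s.length → Ok c (s.drop (s.length - k)) → c + k ≤ gN s c := by
  induction s with
  | nil =>
      intro c k hk _
      simp only [List.length_nil, Nat.le_zero] at hk
      subst hk
      simp [gN]
  | cons d rest ih =>
      intro c k hk hok
      have hpr : rest.Pairwise (· ≤ ·) := (List.pairwise_cons.mp hp).2
      by_cases hkn : k ≤ rest.length
      · rw [show (d :: rest).length - k = (rest.length - k) + 1 by
            simp only [List.length_cons]; omega, List.drop_succ_cons] at hok
        have h1 := ih hpr c k hkn hok
        rw [gN_cons]
        by_cases hstep : (c : Int) + 1 ≤ d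
        · rw [if_pos hstep]
          have := gN_mono rest (by omega : c ≤ c + 1)
          omega
        · rw [if_neg hstep]; omega
      · have hkeq : k = rest.length + 1 := by simp only [List.length_cons] at hk; omega
        rw [show (d :: rest).length - k = 0 by simp only [List.length_cons]; omega,
            List.drop_zero] at hok
        have h0 := hok 0 d (by simp)
        simp only [Nat.cast_zero, add_zero] at h0
        have hstep : (c : Int) + 1 ≤ d := by omega
        rw [gN_cons, if_pos hstep]
        have hokr : Ok (c + 1) (rest.drop (rest.length - rest.length)) := by
          rw [Nat.sub_self, List.drop_zero]
          unfold Ok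
          intro j v hv
          have := hok (j + 1) v (by rw [List.getElem?_cons_succ]; exact hv)
          push_cast at this ⊢; omega
        have := ih hpr (c + 1) rest.length le_rfl hokr
        omega

-- A's loop, started at any k between the greedy count and the length, with the top-k
-- suffix of the sorted list, returns the greedy count.
theorem loop_eq (s : List Int) (hp : s.Pairwise (· ≤ ·)) :
    ∀ k t, gN s 0 ≤ k → k ≤ s.length → (0 < k → t = s.drop (s.length - k)) →
      solveLoop k t = (gN s 0 : Int) := by
  intro k
  induction k with
  | zero =>
      intro t hg _ _
      have h0 : gN s 0 = 0 := by omega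
      simp [solveLoop, h0]
  | succ k ihk =>
      intro t hg hk ht
      have htt := ht (Nat.succ_pos k)
      have hlen : t.length = k + 1 := by rw [htt]; simp only [List.length_drop]; omega
      by_cases hB : ((List.range (k+1)).any
          (fun i => decide ((PySem.List.pyGet? t (i : Int)).getD 0 < (i : Int) + 1))) = true
      · -- some position fails: the for-loop breaks, the head is dropped
        obtain ⟨i, hi, hfail⟩ := List.any_eq_true.mp hB
        have hi' : i < k + 1 := List.mem_range.mp hi
        have hsome : PySem.List.pyGet? t (i : Int) = some (t[i]'(by omega)) := by
          rw [PySem.List.pyGet?_natCast, List.getElem?_eq_getElem (by omega)]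
        rw [hsome] at hfail
        simp only [Option.getD_some, decide_eq_true_eq] at hfail
        -- the greedy count cannot be k+1, else gN_ok contradicts the failing position
        have hglt : gN s 0 ≤ k := by
          by_contra hcon
          have hgeq : gN s 0 = k + 1 := by omega
          have hok := gN_ok s hp 0
          rw [Nat.sub_zero, hgeq, ← htt] at hok
          have := hok i (t[i]'(by omega)) (List.getElem?_eq_getElem (by omega))
          push_cast at this
          omega
        simp only [solveLoop, hB, if_true]
        rw [PySem.List.slice_from_one t]
        refine ihk t.tail hglt (by omega) ?_
        intro hkpos
        rw [htt, List.tail_drop]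
        congr 1
        omega
      · -- no position fails: the for-loop completes and returns k+1; greedy agrees
        have hok : Ok 0 (s.drop (s.length - (k + 1))) := by
          rw [← htt]
          unfold Ok
          intro i v hv
          have hilen : i < k + 1 := by
            obtain ⟨hlt, -⟩ := List.getElem?_eq_some_iff.mp hv
            omega
          have hup := List.any_eq_false.mp (eq_false_of_ne_true hB) i (List.mem_range.mpr hilen)
          rw [PySem.List.pyGet?_natCast, hv] at hup
          simp only [Option.getD_some, decide_eq_true_eq, not_lt] at hup
          push_cast
          omega
        have := gN_complete s hp 0 (k + 1) hk hok
        have hgeq : gN s 0 = k + 1 := by omega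
        simp only [solveLoop, hB, if_false, Bool.false_eq_true, hgeq]
        push_cast
        ring

-- if the greedy count is positive, some element of s is at least that count
theorem gN_le_max (s : List Int) (hp : s.Pairwise (· ≤ ·)) (hpos : 1 ≤ gN s 0) :
    ∃ y ∈ s, (gN s 0 : Int) ≤ y := by
  have hok := gN_ok s hp 0
  rw [Nat.sub_zero] at hok
  set g := gN s 0 with hg
  have hgle : g ≤ s.length := by have := gN_le s 0; omega
  have hlt : g - 1 < (s.drop (s.length - g)).length := by
    simp only [List.length_drop]; omega
  have hv : (s.drop (s.length - g))[g - 1]? = some ((s.drop (s.length - g))[g - 1]'hlt) :=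
    List.getElem?_eq_getElem hlt
  have := hok (g - 1) _ hv
  refine ⟨(s.drop (s.length - g))[g - 1]'hlt,
    List.mem_of_mem_drop (List.getElem_mem _), ?_⟩
  push_cast [Nat.cast_sub hpos] at this
  omega

-- ===== VERDICT (by name: the statement is the Claim_ definition above) =====
theorem solve_spec : Claim_unchanged_solve := by
  intro dice _ hpre hnd
  have hpre' : dice ≠ [] := hpre
  obtain ⟨mv, hmax⟩ : ∃ mv, PySem.List.max? dice (fun x => x) = some mv := by
    cases h : PySem.List.max? dice (fun x => x) with
    | none => exact absurd ((PySem.List.max?_eq_none_iff dice (fun x => x)).mp h) hpre'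
    | some m => exact ⟨m, rfl⟩
  have hmem : mv ∈ dice := PySem.List.max?_mem hmax
  have hmaxle : ∀ y ∈ dice, y ≤ mv := PySem.List.max?_isMax hmax
  have hmv0 : 0 ≤ mv := by
    rcases not_and_or.mp hnd with h | h
    · exact absurd hpre' (by simpa using h)
    · push Not at h
      obtain ⟨d, hd, hd0⟩ := h
      exact le_trans hd0 (hmaxle d hd)
  set s := PySem.List.sorted dice (fun x => x) false with hs
  have hp : s.Pairwise (· ≤ ·) := PySem.List.sorted_pairwise dice (fun x => x)
  have hperm : s.Perm dice := PySem.List.sorted_perm dice (fun x => x) false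
  have hlen : s.length = dice.length := hperm.length_eq
  have hne : dice.length ≠ 0 := fun h => hpre' (List.eq_nil_of_length_eq_zero h)
  set mp : Int := min (dice.length : Int) mv with hmp
  have hmp0 : 0 ≤ mp := le_min (by exact_mod_cast Nat.zero_le _) hmv0
  -- greedy count fits under mp
  have hgn : gN s 0 ≤ s.length := by have := gN_le s 0; omega
  have hgmv : (gN s 0 : Int) ≤ mv := by
    by_cases hz : 1 ≤ gN s 0
    · obtain ⟨y, hy, hyle⟩ := gN_le_max s hp hz
      exact le_trans hyle (hmaxle y (hperm.mem_iff.mp hy))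
    · have : gN s 0 = 0 := by omega
      rw [this]; exact_mod_cast hmv0
  have hgmp : gN s 0 ≤ mp.toNat := by
    have h1 : (gN s 0 : Int) ≤ mp := le_min (by exact_mod_cast hlen ▸ hgn) hgmv
    omega
  have hmpn : mp.toNat ≤ s.length := by
    have : mp ≤ (dice.length : Int) := min_le_left _ _
    omega
  have hslice : 0 < mp.toNat →
      PySem.List.slice s (some (-mp)) none = s.drop (s.length - mp.toNat) := by
    intro hpos
    have hcast : -mp = -((mp.toNat : Nat) : Int) := by omega
    rw [hcast]
    exact PySem.List.slice_from_neg_natCast (xs := s) (k := mp.toNat) hpos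
  have hA : solve dice = solveLoop mp.toNat (PySem.List.slice s (some (-mp)) none) := by
    simp only [solve, hmax, Option.getD_some, ← hs, ← hmp, if_neg (not_lt.mpr hmp0)]
  rw [hA, loop_eq s hp mp.toNat _ hgmp hmpn hslice]
  simp only [solve_alt, ← hs]
  exact (gN_cast s 0).symm

theorem solve_changed : Claim_changed_solve := by unfold Claim_changed_solve; decide

theorem solve_tight : Claim_exact_solve := by
  intro dice _ _ hd
  obtain ⟨hne, hneg⟩ := hd
  obtain ⟨mv, hmax⟩ : ∃ mv, PySem.List.max? dice (fun x => x) = some mv := by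
    cases h : PySem.List.max? dice (fun x => x) with
    | none => exact absurd ((PySem.List.max?_eq_none_iff dice (fun x => x)).mp h) hne
    | some m => exact ⟨m, rfl⟩
  have hmv : mv < 0 := hneg mv (PySem.List.max?_mem hmax)
  have hmpneg : min (dice.length : Int) mv < 0 := lt_of_le_of_lt (min_le_right _ _) hmv
  have hA : solve dice = min (dice.length : Int) mv := by
    simp only [solve, hmax, Option.getD_some, if_pos hmpneg]
  have hB : solve_alt dice = (gN (PySem.List.sorted dice (fun x => x) false) 0 : Int) := by
    simp only [solve_alt]
    exact gN_cast _ 0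
  rw [hA, hB]
  intro h
  have : (0 : Int) ≤ (gN (PySem.List.sorted dice (fun x => x) false) 0 : Int) := by positivity
  omega
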